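-- pv_equiv track=rewrite | github.com/MuthuAjay/contracts_v3 | backend/backend/contract_analyzer/utils.py | _has_valid_structure
-- ===== SOURCE A (Python) =====
-- def _has_valid_structure(content: str) -> bool:
--     """Check document structure"""
--     lines = content.splitlines()
--     has_header = False
--     has_body = False
--     has_sections = False
--
--     for line in lines:
--         if line.isupper() and len(line.split()) <= 5:
--             has_header = True
--         elif len(line.strip()) > 0:
--             has_body = True
--         if line.strip().startswith(('Section', 'SECTION', 'Article', 'ARTICLE')):
--             has_sections = True
--
--     return has_header and has_body and has_sections
-- ===== SOURCE B (Python) =====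
-- def _has_valid_structure(content: str) -> bool:
--     """Check document structure (three independent short-circuiting scans)."""
--     lines = content.splitlines()
--
--     def is_heading(line: str) -> bool:
--         return line.isupper() and len(line.split()) <= 5
--
--     has_header = any(is_heading(line) for line in lines)
--     has_body = any(line.strip() and not is_heading(line) for line in lines)
--     has_sections = any(
--         line.strip().startswith(('Section', 'SECTION', 'Article', 'ARTICLE'))
--         for line in lines
--     )
--     return bool(has_header and has_body and has_sections)
-- ===== Notes on version B (the rewrite author's own statement) =====
-- stated objective: idiomatic
-- what changed: Replaced A's single interleaved flag-mutating loop with three independent short-circuiting any() scans (header, body-excluding-headings, sections) combined at the end.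
import Mathlib
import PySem

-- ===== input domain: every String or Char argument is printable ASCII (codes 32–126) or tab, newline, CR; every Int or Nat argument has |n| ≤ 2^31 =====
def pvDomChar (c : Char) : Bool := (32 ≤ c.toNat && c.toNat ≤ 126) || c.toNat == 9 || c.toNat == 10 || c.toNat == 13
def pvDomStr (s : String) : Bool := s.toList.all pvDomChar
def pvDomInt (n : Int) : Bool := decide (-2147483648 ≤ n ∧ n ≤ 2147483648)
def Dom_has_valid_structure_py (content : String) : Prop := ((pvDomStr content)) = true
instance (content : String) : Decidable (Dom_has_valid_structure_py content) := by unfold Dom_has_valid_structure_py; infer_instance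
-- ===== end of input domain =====

-- B simply replaces A's single flag-setting loop with three independent any-scans (idiomatic decomposition; same complexity).

-- Python str.isupper(), exact on ASCII (the stated domain): at least one cased character and no lowercase one.
def pyStrIsupper (s : String) : Bool :=
  s.toList.any PySem.Chars.isupper && !(s.toList.any PySem.Chars.islower)

-- line.isupper() and len(line.split()) <= 5
def pvIsHeading (line : String) : Bool :=
  pyStrIsupper line && decide ((PySem.Str.split₀ line).length ≤ 5)

-- len(line.strip()) > 0
def pvHasText (line : String) : Bool :=
  decide (0 < (PySem.Str.strip line).length)

-- line.strip().startswith(('Section','SECTION','Article','ARTICLE'))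
def pvIsSection (line : String) : Bool :=
  let t := PySem.Str.strip line
  PySem.Str.startswith t "Section" || PySem.Str.startswith t "SECTION" ||
  PySem.Str.startswith t "Article" || PySem.Str.startswith t "ARTICLE"

-- ===== PORT A =====
-- one pass over the lines, mutating the three flags exactly as A does
def pvStepA (st : Bool × Bool × Bool) (line : String) : Bool × Bool × Bool :=
  let hb : Bool × Bool :=
    if pvIsHeading line then (true, st.2.1)
    else if pvHasText line then (st.1, true)
    else (st.1, st.2.1)
  let s : Bool := if pvIsSection line then true else st.2.2
  (hb.1, hb.2, s)

def has_valid_structure_py (content : String) : Bool :=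
  let lines := PySem.Str.splitlines content
  let res := lines.foldl pvStepA (false, false, false)
  res.1 && res.2.1 && res.2.2

-- ===== PORT B =====
def has_valid_structure_py_alt (content : String) : Bool :=
  let lines := PySem.Str.splitlines content
  let has_header := lines.any (fun line => pvIsHeading line)
  let has_body := lines.any (fun line => pvHasText line && !(pvIsHeading line))
  let has_sections := lines.any (fun line => pvIsSection line)
  has_header && has_body && has_sections

-- ===== PRECONDITION & SPEC =====
def Spec_has_valid_structure_py (content : String) (out : Bool) : Prop := out = has_valid_structure_py_alt content
instance (content : String) (out : Bool) : Decidable (Spec_has_valid_structure_py content out) := by unfold Spec_has_valid_structure_py; infer_instance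

-- ===== CLAIM (what is proved, stated in full; the proofs are below) =====
def Claim_equal_has_valid_structure_py : Prop := ∀ (content : String), Dom_has_valid_structure_py content → Spec_has_valid_structure_py content (has_valid_structure_py content)

-- ===== LEMMAS AND PROOFS =====
theorem foldl_stepA (lines : List String) (h0 b0 s0 : Bool) :
    lines.foldl pvStepA (h0, b0, s0) =
      (h0 || lines.any (fun l => pvIsHeading l),
       b0 || lines.any (fun l => pvHasText l && !(pvIsHeading l)),
       s0 || lines.any (fun l => pvIsSection l)) := by
  induction lines generalizing h0 b0 s0 with
  | nil => simp
  | cons l ls ih =>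
    simp only [List.foldl_cons, List.any_cons, pvStepA]
    by_cases hh : pvIsHeading l <;> by_cases hb : pvHasText l <;> by_cases hs : pvIsSection l <;>
      simp [hh, hb, hs, ih]

-- ===== VERDICT (by name: the statement is the Claim_ definition above) =====
theorem has_valid_structure_py_spec : Claim_equal_has_valid_structure_py := by
  intro content _
  unfold Spec_has_valid_structure_py has_valid_structure_py has_valid_structure_py_alt
  simp [foldl_stepA]
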